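-- pv_equiv track=rewrite | github.com/asweigart/programmedpatterns | book/visualpatterns.py | formula35
-- ===== SOURCE A (Python) =====
-- def formula35(step):
--     count = 1
--     i = 2
--     while True:
--         if i > step:
--             break
--         count += 0
--         i += 1
--
--         if i > step:
--             break
--         count += 0
--         i += 1
--
--         if i > step:
--             break
--         count += 2
--         i += 1
--     return count
-- ===== SOURCE B (Python) =====
-- def formula35(step):
--     # Closed form: the loop adds 2 once for every third index 4, 7, 10, ... <= step.
--     return 1 + 2 * max(0, (step - 1) // 3)
-- ===== Notes on version B (the rewrite author's own statement) =====
-- stated objective: faster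
-- what changed: Replaced the unrolled 3-step counting loop with the closed form 1 + 2*max(0, (step-1)//3).
import Mathlib
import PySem

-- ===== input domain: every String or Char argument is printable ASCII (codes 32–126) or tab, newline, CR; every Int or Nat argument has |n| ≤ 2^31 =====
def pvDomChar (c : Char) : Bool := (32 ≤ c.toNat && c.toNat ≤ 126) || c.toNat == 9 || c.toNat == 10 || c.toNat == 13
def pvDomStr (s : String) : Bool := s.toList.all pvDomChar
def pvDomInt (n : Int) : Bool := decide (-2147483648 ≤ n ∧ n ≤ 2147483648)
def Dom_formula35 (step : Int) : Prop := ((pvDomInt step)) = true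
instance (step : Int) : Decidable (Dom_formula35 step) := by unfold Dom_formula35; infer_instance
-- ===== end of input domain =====

-- B replaces A's unrolled while-loop by the closed form 1 + 2*max(0, (step-1)//3); same value, O(1).

-- ===== PORT A =====
-- the 'while True' loop of A, with its three unrolled check/increment blocks
def formula35Loop (step : Int) (count i : Int) : Int :=
  if i > step then count
  else
    -- count += 0; i += 1
    if i + 1 > step then count
    else
      -- count += 0; i += 1
      if i + 2 > step then count
      else
        -- count += 2; i += 1
        formula35Loop step (count + 2) (i + 3)
termination_by (step + 1 - i).toNat
decreasing_by omega

def formula35 (step : Int) : Int := formula35Loop step 1 2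

-- ===== PORT B =====
def formula35_alt (step : Int) : Int :=
  1 + 2 * max 0 (PySem.Int.floordiv (step - 1) 3)

-- ===== PRECONDITION & SPEC =====
def Spec_formula35 (step : Int) (out : Int) : Prop := out = formula35_alt step
instance (step : Int) (out : Int) : Decidable (Spec_formula35 step out) := by unfold Spec_formula35; infer_instance

-- ===== CLAIM (what is proved, stated in full; the proofs are below) =====
def Claim_equal_formula35 : Prop := ∀ (step : Int), Dom_formula35 step → Spec_formula35 step (formula35 step)

-- ===== LEMMAS AND PROOFS =====
theorem formula35Loop_closed (step count i : Int) :
    formula35Loop step count i = count + 2 * max 0 ((step - i + 1) / 3) := by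
  induction count, i using formula35Loop.induct step with
  | case1 count i h =>
    rw [formula35Loop]
    simp only [if_pos h]
    rw [max_def]
    split <;> omega
  | case2 count i h1 h2 =>
    rw [formula35Loop]
    simp only [if_neg h1, if_pos h2]
    rw [max_def]
    split <;> omega
  | case3 count i h1 h2 h3 =>
    rw [formula35Loop]
    simp only [if_neg h1, if_neg h2, if_pos h3]
    rw [max_def]
    split <;> omega
  | case4 count i h1 h2 h3 ih =>
    rw [formula35Loop]
    simp only [if_neg h1, if_neg h2, if_neg h3]
    rw [ih, max_def, max_def]
    split <;> split <;> omega

-- ===== VERDICT (by name: the statement is the Claim_ definition above) =====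
theorem formula35_spec : Claim_equal_formula35 := by
  intro step _
  unfold Spec_formula35 formula35 formula35_alt
  rw [formula35Loop_closed, PySem.Int.floordiv_eq_ediv_of_pos (by omega)]
  have : step - 2 + 1 = step - 1 := by ring
  rw [this]
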